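-- pv_equiv track=rewrite | github.com/DeepRiskAUMC/DEEP-RISK-Fibrosis-project-2021-2022 | fibrosis_segmentation_FvL/data_loading/load_data.py | get_slice_indices
-- ===== SOURCE A (Python) =====
-- def get_slice_indices(pat_ids):
--     indices = []
--     slice_nr = 0
--     prev_pat_id = None
--     for pat_id in pat_ids:
--         if prev_pat_id is None:
--             prev_pat_id = pat_id
--         elif prev_pat_id == pat_id:
--             slice_nr += 1
--         else:
--             slice_nr = 0
--         indices.append(slice_nr)
--         prev_pat_id = pat_id
--     if len(indices) != len(pat_ids):
--         raise ValueError('Number of slice indices must be equal to number of patient ids')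
--     return indices
-- ===== SOURCE B (Python) =====
-- def get_slice_indices(pat_ids):
--     # Split pat_ids into maximal runs of consecutive equal ids; each run of
--     # length L contributes 0..L-1 to the output.
--     indices = []
--     i, n = 0, len(pat_ids)
--     while i < n:
--         j = i
--         while j < n and pat_ids[j] == pat_ids[i]:
--             j += 1
--         indices.extend(range(j - i))
--         i = j
--     return indices
-- ===== Notes on version B (the rewrite author's own statement) =====
-- stated objective: alternative
-- what changed: Replaced the stateful prev/slice_nr single-pass loop by a run-splitting two-pointer scan that emits range(run_length) per maximal run of equal ids, dropping the provably dead length check.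
import Mathlib
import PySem

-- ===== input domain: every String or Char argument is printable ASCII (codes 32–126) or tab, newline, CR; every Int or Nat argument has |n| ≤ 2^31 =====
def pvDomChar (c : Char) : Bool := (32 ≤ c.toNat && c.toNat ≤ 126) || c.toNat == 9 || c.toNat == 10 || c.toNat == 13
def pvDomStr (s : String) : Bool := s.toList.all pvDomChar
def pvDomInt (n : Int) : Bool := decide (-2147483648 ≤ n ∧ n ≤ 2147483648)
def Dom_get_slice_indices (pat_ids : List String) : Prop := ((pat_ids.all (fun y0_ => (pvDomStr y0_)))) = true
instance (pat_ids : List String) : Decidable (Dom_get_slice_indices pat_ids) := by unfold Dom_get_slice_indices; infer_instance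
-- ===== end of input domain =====

-- B replaces A's stateful prev/slice_nr loop by a run-splitting scan emitting 0..len-1
-- per maximal run of equal ids (alternative decomposition; A's length check is dead code).


-- ===== PORT A =====
-- the for-loop of A: state (indices, slice_nr, prev_pat_id)
def gsiLoopA : List String → List Int → Int → Option String → List Int
  | [], indices, _, _ => indices
  | pat_id :: rest, indices, slice_nr, prev =>
    match prev with
    | none => gsiLoopA rest (indices ++ [slice_nr]) slice_nr (some pat_id)
    | some q =>
      if q == pat_id then
        gsiLoopA rest (indices ++ [slice_nr + 1]) (slice_nr + 1) (some pat_id)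
      else
        gsiLoopA rest (indices ++ [(0 : Int)]) 0 (some pat_id)

-- A's final `if len(indices) != len(pat_ids): raise` never fires (one append per element); omitted.
def get_slice_indices (pat_ids : List String) : List Int :=
  gsiLoopA pat_ids [] 0 none

-- ===== PORT B =====
-- inner while loop of Source B: length of the maximal prefix of xs equal to x, and the remainder
def gsiSplitRun (x : String) : List String → Nat × List String
  | [] => (0, [])
  | y :: ys => if y == x then
      let p := gsiSplitRun x ys
      (p.1 + 1, p.2)
    else (0, y :: ys)

theorem gsiSplitRun_len (x : String) (xs : List String) : (gsiSplitRun x xs).2.length ≤ xs.length := by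
  induction xs with
  | nil => simp [gsiSplitRun]
  | cons y ys ih =>
    simp only [gsiSplitRun]
    split
    · exact Nat.le_trans ih (Nat.le_succ _)
    · simp

-- outer while loop of Source B: each maximal run of length L contributes range(L)
def get_slice_indices_alt : List String → List Int
  | [] => []
  | x :: xs =>
    let p := gsiSplitRun x xs
    (List.range (p.1 + 1)).map (fun i : Nat => (i : Int)) ++ get_slice_indices_alt p.2
termination_by l => l.length
decreasing_by
  have := gsiSplitRun_len x xs
  simp
  omega

-- ===== PRECONDITION & SPEC =====
def Spec_get_slice_indices (pat_ids : List String) (out : List Int) : Prop := out = get_slice_indices_alt pat_ids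
instance (pat_ids : List String) (out : List Int) : Decidable (Spec_get_slice_indices pat_ids out) := by unfold Spec_get_slice_indices; infer_instance

-- ===== CLAIM (what is proved, stated in full; the proofs are below) =====
def Claim_equal_get_slice_indices : Prop := ∀ (pat_ids : List String), Dom_get_slice_indices pat_ids → Spec_get_slice_indices pat_ids (get_slice_indices pat_ids)

-- ===== LEMMAS AND PROOFS =====

theorem cons_range_map_int (k : Nat) (s : Int) :
    s :: (List.range k).map (fun i : Nat => s + 1 + (i : Int)) =
      (List.range (k + 1)).map (fun i : Nat => s + (i : Int)) := by
  rw [List.range_succ_eq_map, List.map_cons, List.map_map]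
  refine congrArg₂ _ (by simp) ?_
  refine List.map_congr_left ?_
  intro i _
  simp [Function.comp]
  ring

theorem gsiLoopA_some (xs : List String) :
    ∀ (x : String) (s : Int) (acc : List Int),
      gsiLoopA xs acc s (some x) =
        acc ++ (List.range (gsiSplitRun x xs).1).map (fun i : Nat => s + 1 + (i : Int)) ++
          get_slice_indices_alt (gsiSplitRun x xs).2 := by
  induction xs with
  | nil => intro x s acc; simp [gsiLoopA, gsiSplitRun, get_slice_indices_alt]
  | cons y ys ih =>
    intro x s acc
    by_cases h : y = x
    · subst h
      show gsiLoopA (y :: ys) acc s (some y) = _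
      simp only [gsiLoopA, gsiSplitRun, beq_self_eq_true, if_true]
      rw [ih y (s + 1) (acc ++ [s + 1])]
      rw [List.append_assoc, List.append_assoc, List.cons_append, List.nil_append,
        ← List.cons_append, cons_range_map_int (gsiSplitRun y ys).1 (s + 1),
        ← List.append_assoc]
    · have hb : (y == x) = false := beq_eq_false_iff_ne.mpr h
      have hb2 : (x == y) = false := beq_eq_false_iff_ne.mpr (Ne.symm h)
      simp only [gsiLoopA, gsiSplitRun, hb, hb2, Bool.false_eq_true, if_false]
      rw [ih y 0 (acc ++ [(0 : Int)])]
      rw [List.append_assoc, List.append_assoc, List.cons_append, List.nil_append,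
        ← List.cons_append, cons_range_map_int (gsiSplitRun y ys).1 0]
      simp only [get_slice_indices_alt, List.range_zero, List.map_nil, List.append_nil]
      have hf : (fun i : Nat => (0 : Int) + (i : Int)) = (fun i : Nat => (i : Int)) := by
        funext i; simp
      rw [hf]

theorem gsiEqual (pat_ids : List String) :
    get_slice_indices pat_ids = get_slice_indices_alt pat_ids := by
  cases pat_ids with
  | nil => simp [get_slice_indices, gsiLoopA, get_slice_indices_alt]
  | cons x xs =>
    show gsiLoopA (x :: xs) [] 0 none = _
    simp only [gsiLoopA]
    rw [gsiLoopA_some xs x 0 ([] ++ [(0 : Int)])]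
    rw [List.nil_append, List.cons_append, List.nil_append,
      cons_range_map_int (gsiSplitRun x xs).1 0]
    simp only [get_slice_indices_alt]
    have hf : (fun i : Nat => (0 : Int) + (i : Int)) = (fun i : Nat => (i : Int)) := by
      funext i; simp
    rw [hf]

-- ===== VERDICT (by name: the statement is the Claim_ definition above) =====
theorem get_slice_indices_spec : Claim_equal_get_slice_indices := by
  intro pat_ids _
  exact gsiEqual pat_ids
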